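-- pv_equiv track=rewrite | github.com/dnxnf/Meachine-Learning-New | pythonProblem/16Vowel.py | solve
-- ===== SOURCE A (Python) =====
-- import string
--
-- def solve(flaw: int, s: string) -> int:
--     """找出指定瑕疵度的最长元音字符子串，并返回其长度"""
--     n = len(s)
--     flaw_cnt = [0] * (n + 1)    # 瑕疵度表, flaw_cnt[x] 表示前 s[:x] 的瑕疵度
--     vowels = set("aeiouAEIOU")
--     vowel_idxs = []             # 元音字符下标列表
--
--     cnt = 0
--     for i, c in enumerate(s):
--         if c in vowels:  # 元音字符
--             vowel_idxs.append(i)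
--         else:  # 非元音字母:  瑕疵度 + 1
--             cnt += 1
--         flaw_cnt[i + 1] = cnt
--
--     l, max_length = 0, 0
--     for r in range(len(vowel_idxs)):
--         right = vowel_idxs[r]
--         while l <= r:
--             left = vowel_idxs[l]
--             # 计算区间内的瑕疵度
--             cur_flaw = flaw_cnt[right + 1] - flaw_cnt[left]
--             if cur_flaw > flaw:  # 比预期的瑕疵度大，则左侧指针右移缩小窗口
--                 l += 1
--                 continue
--             if cur_flaw == flaw:
--                 max_length = max(max_length, right - left + 1)
--             break
--
--     return max_length
-- ===== SOURCE B (Python) =====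
-- import string
--
-- def solve(flaw: int, s: string) -> int:
--     """找出指定瑕疵度的最长元音字符子串，并返回其长度"""
--     n = len(s)
--     flaw_cnt = [0] * (n + 1)    # flaw_cnt[x] = flaws in s[:x]
--     vowels = set("aeiouAEIOU")
--     vowel_idxs = []
--
--     cnt = 0
--     for i, c in enumerate(s):
--         if c in vowels:
--             vowel_idxs.append(i)
--         else:
--             cnt += 1
--         flaw_cnt[i + 1] = cnt
--
--     # One pass with a hash map: first_seen[v] = earliest vowel index whose
--     # prefix-flaw value is v; a window [left, right] has flaw count
--     # flaw_cnt[right+1] - flaw_cnt[left], so we look up the target prefix value.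
--     first_seen = {}
--     max_length = 0
--     for right in vowel_idxs:
--         first_seen.setdefault(flaw_cnt[right], right)
--         target = flaw_cnt[right + 1] - flaw
--         if target in first_seen:
--             max_length = max(max_length, right - first_seen[target] + 1)
--     return max_length
-- ===== Notes on version B (the rewrite author's own statement) =====
-- stated objective: alternative
-- what changed: The maintained two-pointer window over vowel_idxs (inner while advancing l) is replaced by a single pass that records in a dict the first vowel index for each prefix-flaw value and looks up target = flaw_cnt[right+1] - flaw directly.
import Mathlib
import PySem

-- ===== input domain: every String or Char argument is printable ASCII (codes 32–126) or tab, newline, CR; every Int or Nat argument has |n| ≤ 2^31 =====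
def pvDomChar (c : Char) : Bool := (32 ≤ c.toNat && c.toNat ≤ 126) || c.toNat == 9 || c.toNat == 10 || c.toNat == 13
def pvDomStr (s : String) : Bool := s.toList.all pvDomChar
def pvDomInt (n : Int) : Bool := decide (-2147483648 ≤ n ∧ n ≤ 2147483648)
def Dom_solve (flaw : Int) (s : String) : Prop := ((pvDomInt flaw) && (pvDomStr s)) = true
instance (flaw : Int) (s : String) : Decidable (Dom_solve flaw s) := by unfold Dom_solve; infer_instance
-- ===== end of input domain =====

-- B replaces A's maintained two-pointer window over the vowel indices by a single pass with a
-- dict mapping each prefix-flaw value to its first vowel index (objective: alternative, same cost).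

-- ===== PORT A =====
-- vowels = set("aeiouAEIOU")  (used only for membership; the identical line appears in both sources)
def pvVowels : List Char := PySem.Set.ofList "aeiouAEIOU".toList

-- the first for-loop, textually identical in A and B: builds vowel_idxs and fills flaw_cnt[i+1] = cnt.
-- The written index i+1 is always in range of the replicate-(n+1) list, so List.set is exact.
def pvPhase1 : List Char → Nat → Int → List Int → List Int → List Int × List Int
  | [], _, _, vidx, fc => (vidx, fc)
  | c :: rest, i, cnt, vidx, fc =>
    if pvVowels.contains c then
      pvPhase1 rest (i+1) cnt (vidx ++ [(i : Int)]) (fc.set (i+1) cnt)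
    else
      pvPhase1 rest (i+1) (cnt+1) vidx (fc.set (i+1) (cnt+1))

-- A's inner `while l <= r` loop; l, r are A's loop counters (always ≥ 0, hence Nat);
-- vowel_idxs[l] is only read when l ≤ r < len(vowel_idxs), in range, so getD is exact there.
def solveWhile (flaw : Int) (fc vidx : List Int) (right : Int) (r l : Nat) (maxLen : Int) : Nat × Int :=
  if l ≤ r then
    let left := vidx.getD l 0
    let cur := PySem.List.pyGetD fc (right + 1) 0 - PySem.List.pyGetD fc left 0
    if cur > flaw then solveWhile flaw fc vidx right r (l+1) maxLen
    else if cur = flaw then (l, max maxLen (right - left + 1))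
    else (l, maxLen)
  else (l, maxLen)
termination_by r + 1 - l
decreasing_by omega

def solve (flaw : Int) (s : String) : Int :=
  let n := s.toList.length
  let p := pvPhase1 s.toList 0 0 [] (List.replicate (n+1) 0)
  let vidx := p.1
  let fc := p.2
  let res := (List.range vidx.length).foldl
    (fun (st : Nat × Int) r => solveWhile flaw fc vidx (vidx.getD r 0) r st.1 st.2) (0, 0)
  res.2

-- ===== PORT B =====
def solve_alt (flaw : Int) (s : String) : Int :=
  let n := s.toList.length
  let p := pvPhase1 s.toList 0 0 [] (List.replicate (n+1) 0)
  let vidx := p.1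
  let fc := p.2
  let res := vidx.foldl
    (fun (st : PySem.Dict Int Int × Int) right =>
      let d := st.1.setdefault (PySem.List.pyGetD fc right 0) right
      let target := PySem.List.pyGetD fc (right + 1) 0 - flaw
      match d.get? target with
      | some left => (d, max st.2 (right - left + 1))
      | none => (d, st.2)) (PySem.Dict.empty, 0)
  res.2

-- ===== PRECONDITION & SPEC =====
def Spec_solve (flaw : Int) (s : String) (out : Int) : Prop := out = solve_alt flaw s
instance (flaw : Int) (s : String) (out : Int) : Decidable (Spec_solve flaw s out) := by unfold Spec_solve; infer_instance

-- ===== CLAIM (what is proved, stated in full; the proofs are below) =====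
def Claim_equal_solve : Prop := ∀ (flaw : Int) (s : String), Dom_solve flaw s → Spec_solve flaw s (solve flaw s)

-- ===== LEMMAS AND PROOFS =====

-- prefix-flaw value read at the j-th vowel index
def pvG (fc vidx : List Int) (j : Nat) : Int := PySem.List.pyGetD fc (vidx.getD j 0) 0
-- number of non-vowels among the first k characters
def pvF (cs : List Char) (k : Nat) : Int := ((cs.take k).countP (fun c => !pvVowels.contains c) : Int)
-- the vowel indices of cs, offset by i
def pvVIdx : List Char → Nat → List Int
  | [], _ => []
  | c :: rest, i => if pvVowels.contains c then (i : Int) :: pvVIdx rest (i+1) else pvVIdx rest (i+1)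
-- A's loop step over r and B's loop step over right (definitionally the lambdas in solve / solve_alt)
def pvStepA (flaw : Int) (fc vidx : List Int) (st : Nat × Int) (r : Nat) : Nat × Int :=
  solveWhile flaw fc vidx (vidx.getD r 0) r st.1 st.2
def pvStepB (flaw : Int) (fc : List Int) (st : PySem.Dict Int Int × Int) (right : Int) :
    PySem.Dict Int Int × Int :=
  let d := st.1.setdefault (PySem.List.pyGetD fc right 0) right
  let target := PySem.List.pyGetD fc (right + 1) 0 - flaw
  match d.get? target with
  | some left => (d, max st.2 (right - left + 1))
  | none => (d, st.2)

lemma pv_find?_range' (p : Nat → Bool) :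
    ∀ (k l j : Nat), (List.range' l k).find? p = some j →
      l ≤ j ∧ j < l + k ∧ p j = true ∧ ∀ i, l ≤ i → i < j → p i = false := by
  intro k
  induction k with
  | zero => intro l j h; simp at h
  | succ k ih =>
    intro l j h
    rw [List.range'_succ] at h
    by_cases hp : p l
    · rw [List.find?_cons_of_pos hp] at h
      injection h with h; subst h
      exact ⟨le_refl _, by omega, hp, fun i h1 h2 => by omega⟩
    · rw [List.find?_cons_of_neg (by simp [hp])] at h
      obtain ⟨h1, h2, h3, h4⟩ := ih (l+1) j h
      refine ⟨by omega, by omega, h3, fun i hi1 hi2 => ?_⟩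
      rcases Nat.eq_or_lt_of_le hi1 with rfl | hlt
      · simpa using hp
      · exact h4 i hlt hi2

lemma pv_find?_range_some (p : Nat → Bool) (j : Nat) (hp : p j = true)
    (hmin : ∀ i, i < j → p i = false) : ∀ n, j < n → (List.range n).find? p = some j := by
  intro n
  induction n with
  | zero => omega
  | succ n ih =>
    intro hj
    rw [List.range_succ, List.find?_append]
    rcases Nat.lt_or_ge j n with h | h
    · rw [ih h]; rfl
    · have hjn : j = n := by omega
      have hnone : (List.range n).find? p = none := by
        rw [List.find?_eq_none]
        intro x hx
        simp only [List.mem_range] at hx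
        simp [hmin x (by omega)]
      rw [hnone, hjn]
      simp [hjn ▸ hp]

lemma pv_getElem?_set (l : List Int) (i j : Nat) (a : Int) :
    (l.set i a)[j]? = if i = j ∧ i < l.length then some a else l[j]? := by
  rw [List.getElem?_set]
  split_ifs <;> simp_all <;> omega

lemma pv_take_succ_getD (l : List Int) (t : Nat) (h : t < l.length) :
    l.take (t+1) = l.take t ++ [l.getD t 0] := by
  rw [List.take_add_one, List.getElem?_eq_getElem h, List.getD_eq_getElem l 0 h]; rfl

lemma solveWhile_spec (flaw : Int) (fc vidx : List Int) (right : Int) (r : Nat) :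
    ∀ (k l : Nat) (m : Int), l + k = r + 1 →
    solveWhile flaw fc vidx right r l m =
      match (List.range' l k).find? (fun j => PySem.List.pyGetD fc (right+1) 0 - flaw ≤ pvG fc vidx j) with
      | none => (r + 1, m)
      | some j => if pvG fc vidx j = PySem.List.pyGetD fc (right+1) 0 - flaw
                  then (j, max m (right - vidx.getD j 0 + 1)) else (j, m) := by
  intro k
  induction k with
  | zero =>
    intro l m hl
    rw [solveWhile]
    simp only [List.range'_zero, List.find?_nil]
    rw [if_neg (by omega), show l = r + 1 from by omega]
  | succ k ih =>
    intro l m hl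
    have hlr : l ≤ r := by omega
    rw [solveWhile, if_pos hlr, List.range'_succ]
    simp only []
    by_cases hgt : PySem.List.pyGetD fc (right + 1) 0 - PySem.List.pyGetD fc (vidx.getD l 0) 0 > flaw
    · rw [if_pos hgt]
      rw [List.find?_cons_of_neg (by simp only [pvG, decide_eq_true_eq]; omega)]
      exact ih (l+1) m (by omega)
    · rw [if_neg hgt]
      rw [List.find?_cons_of_pos (by simp only [pvG, decide_eq_true_eq]; omega)]
      by_cases heq : PySem.List.pyGetD fc (right + 1) 0 - PySem.List.pyGetD fc (vidx.getD l 0) 0 = flaw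
      · rw [if_pos heq]
        simp only [pvG]
        rw [if_pos (by omega)]
      · rw [if_neg heq]
        simp only [pvG]
        rw [if_neg (by omega)]

lemma pvInv (flaw : Int) (fc vidx : List Int)
    (Hv : ∀ j, j < vidx.length → PySem.List.pyGetD fc (vidx.getD j 0 + 1) 0 = pvG fc vidx j)
    (Hm : ∀ i j, i ≤ j → j < vidx.length → pvG fc vidx i ≤ pvG fc vidx j) :
    ∀ t, t ≤ vidx.length →
    (((List.range t).foldl (pvStepA flaw fc vidx) (0, 0)).2
        = ((vidx.take t).foldl (pvStepB flaw fc) (PySem.Dict.empty, 0)).2)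
    ∧ (∀ x : Int, ((vidx.take t).foldl (pvStepB flaw fc) (PySem.Dict.empty, 0)).1.get? x
        = ((List.range t).find? (fun j => pvG fc vidx j == x)).map (fun j => vidx.getD j 0))
    ∧ ((List.range t).foldl (pvStepA flaw fc vidx) (0, 0)).1 ≤ t
    ∧ (∀ j, j < ((List.range t).foldl (pvStepA flaw fc vidx) (0, 0)).1 →
        pvG fc vidx j < pvG fc vidx (t-1) - flaw) := by
  intro t
  induction t with
  | zero =>
    intro _
    refine ⟨rfl, ?_, le_refl _, ?_⟩
    · intro x; simp [PySem.Dict.get?_empty]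
    · intro j hj; simp at hj
  | succ t ih =>
    intro ht1
    have htk : t < vidx.length := by omega
    obtain ⟨hmeq, hdict, hlle, hllt⟩ := ih (by omega)
    set lA := ((List.range t).foldl (pvStepA flaw fc vidx) (0, 0)).1 with hlA
    set mA := ((List.range t).foldl (pvStepA flaw fc vidx) (0, 0)).2 with hmA
    set dB := ((vidx.take t).foldl (pvStepB flaw fc) (PySem.Dict.empty, 0)).1 with hdB
    set mB := ((vidx.take t).foldl (pvStepB flaw fc) (PySem.Dict.empty, 0)).2 with hmB
    -- unfold one step on each side
    have hA : (List.range (t+1)).foldl (pvStepA flaw fc vidx) (0, 0)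
        = pvStepA flaw fc vidx (lA, mA) t := by
      rw [List.range_succ, List.foldl_append]
      simp [hlA, hmA]
    have hB : (vidx.take (t+1)).foldl (pvStepB flaw fc) (PySem.Dict.empty, 0)
        = pvStepB flaw fc (dB, mB) (vidx.getD t 0) := by
      rw [pv_take_succ_getD vidx t htk, List.foldl_append]
      simp [hdB, hmB]
    set T : Int := PySem.List.pyGetD fc (vidx.getD t 0 + 1) 0 - flaw with hT
    have hTG : T = pvG fc vidx t - flaw := by rw [hT, Hv t htk]
    -- the entry invariant for this step's while loop
    have Hentry : ∀ j, j < lA → pvG fc vidx j < T := by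
      intro j hj
      have h1 := hllt j hj
      have h2 : pvG fc vidx (t-1) ≤ pvG fc vidx t := Hm (t-1) t (by omega) htk
      omega
    -- A's step through the while-loop characterisation
    have hWA : pvStepA flaw fc vidx (lA, mA) t =
        match (List.range' lA (t + 1 - lA)).find?
            (fun j => T ≤ pvG fc vidx j) with
        | none => (t + 1, mA)
        | some j => if pvG fc vidx j = T
                    then (j, max mA (vidx.getD t 0 - vidx.getD j 0 + 1)) else (j, mA) := by
      have := solveWhile_spec flaw fc vidx (vidx.getD t 0) t (t + 1 - lA) lA mA (by omega)
      simpa [pvStepA, hT] using this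
    -- B's new dict
    have hsdT : PySem.List.pyGetD fc (vidx.getD t 0) 0 = pvG fc vidx t := rfl
    set d' := dB.setdefault (pvG fc vidx t) (vidx.getD t 0) with hd'def
    have hB' : pvStepB flaw fc (dB, mB) (vidx.getD t 0) =
        match d'.get? T with
        | some left => (d', max mB (vidx.getD t 0 - left + 1))
        | none => (d', mB) := by
      simp only [pvStepB, hsdT, hT, hd'def]
    have hd' : ∀ x : Int, d'.get? x =
        ((List.range (t+1)).find? (fun j => pvG fc vidx j == x)).map (fun j => vidx.getD j 0) := by
      intro x
      rw [List.range_succ, List.find?_append]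
      cases hc : dB.contains (pvG fc vidx t) with
      | true =>
        rw [hd'def, PySem.Dict.setdefault_of_contains dB (vidx.getD t 0) hc, hdict x]
        cases hfx : (List.range t).find? (fun j => pvG fc vidx j == x) with
        | some j => simp [hfx]
        | none =>
          by_cases hx : pvG fc vidx t = x
          · exfalso
            rw [PySem.Dict.contains_eq_isSome_get?, hdict (pvG fc vidx t)] at hc
            subst hx
            rw [hfx] at hc
            simp at hc
          · simp [hfx, hx]
      | false =>
        rw [hd'def, PySem.Dict.setdefault_of_not_contains dB (vidx.getD t 0) hc,
            PySem.Dict.get?_insert]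
        have hnone : (List.range t).find? (fun j => pvG fc vidx j == pvG fc vidx t) = none := by
          have := hdict (pvG fc vidx t)
          rw [PySem.Dict.contains_eq_isSome_get?, this] at hc
          cases hfx : (List.range t).find? (fun j => pvG fc vidx j == pvG fc vidx t) with
          | none => rfl
          | some j => rw [hfx] at hc; simp at hc
        by_cases hx : x = pvG fc vidx t
        · subst hx
          rw [if_pos rfl, hnone]
          simp
        · rw [if_neg hx, hdict x]
          cases hfx : (List.range t).find? (fun j => pvG fc vidx j == x) with
          | some j => simp [hfx]
          | none =>
            have : (pvG fc vidx t == x) = false := by simp; exact fun h => hx h.symm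
            simp [hfx, this]
    -- now the three cases of the while loop
    cases hF : (List.range' lA (t + 1 - lA)).find? (fun j => T ≤ pvG fc vidx j) with
    | none =>
      have hall : ∀ j, j ≤ t → pvG fc vidx j < T := by
        intro j hj
        rcases Nat.lt_or_ge j lA with h | h
        · exact Hentry j h
        · have := List.find?_eq_none.mp hF j (by simp [List.mem_range'_1]; omega)
          simpa using this
      have hgetT : d'.get? T = none := by
        rw [hd' T, List.find?_eq_none.mpr]
        · rfl
        · intro j hj
          simp only [List.mem_range] at hj
          have := hall j (by omega)
          simp
          omega
      have hAstep : pvStepA flaw fc vidx (lA, mA) t = (t + 1, mA) := by rw [hWA, hF]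
      have hBstep : pvStepB flaw fc (dB, mB) (vidx.getD t 0) = (d', mB) := by rw [hB', hgetT]
      rw [hA, hAstep, hB, hBstep]
      refine ⟨hmeq, hd', by omega, ?_⟩
      intro j hj
      have hj' : j < t + 1 := hj
      have := hall j (by omega)
      rw [Nat.add_sub_cancel]
      omega
    | some j =>
      obtain ⟨hj1, hj2, hj3, hj4⟩ := pv_find?_range' _ _ _ _ hF
      have hj3' : T ≤ pvG fc vidx j := by simpa using hj3
      have hbefore : ∀ i, i < j → pvG fc vidx i < T := by
        intro i hi
        rcases Nat.lt_or_ge i lA with h | h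
        · exact Hentry i h
        · have := hj4 i h hi
          simpa using this
      by_cases heq : pvG fc vidx j = T
      · have hfind : (List.range (t+1)).find? (fun i => pvG fc vidx i == T) = some j := by
          apply pv_find?_range_some _ _ (by simp [heq]) _ _ (by omega)
          intro i hi
          have := hbefore i hi
          simp
          omega
        have hgetT : d'.get? T = some (vidx.getD j 0) := by
          rw [hd' T, hfind]; rfl
        have hAstep : pvStepA flaw fc vidx (lA, mA) t
            = (j, max mA (vidx.getD t 0 - vidx.getD j 0 + 1)) := by
          rw [hWA, hF]; simp only [if_pos heq]
        have hBstep : pvStepB flaw fc (dB, mB) (vidx.getD t 0)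
            = (d', max mB (vidx.getD t 0 - vidx.getD j 0 + 1)) := by
          rw [hB', hgetT]
        rw [hA, hAstep, hB, hBstep]
        refine ⟨by rw [hmeq], hd', by omega, ?_⟩
        intro i hi
        have hi' : i < j := hi
        have := hbefore i hi'
        rw [Nat.add_sub_cancel]
        omega
      · have hgtT : T < pvG fc vidx j := by omega
        have hfind : (List.range (t+1)).find? (fun i => pvG fc vidx i == T) = none := by
          rw [List.find?_eq_none.mpr]
          intro i hi
          simp only [List.mem_range] at hi
          rcases Nat.lt_or_ge i j with h | h
          · have := hbefore i h
            simp; omega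
          · have : pvG fc vidx j ≤ pvG fc vidx i := Hm j i h (by omega)
            simp; omega
        have hgetT : d'.get? T = none := by rw [hd' T, hfind]; rfl
        have hAstep : pvStepA flaw fc vidx (lA, mA) t = (j, mA) := by
          rw [hWA, hF]; simp only [if_neg heq]
        have hBstep : pvStepB flaw fc (dB, mB) (vidx.getD t 0) = (d', mB) := by
          rw [hB', hgetT]
        rw [hA, hAstep, hB, hBstep]
        refine ⟨hmeq, hd', by omega, ?_⟩
        intro i hi
        have hi' : i < j := hi
        have := hbefore i hi'
        rw [Nat.add_sub_cancel]
        omega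

lemma pvPhase1_fst (cs : List Char) :
    ∀ (i : Nat) (cnt : Int) (vidx fc : List Int),
      (pvPhase1 cs i cnt vidx fc).1 = vidx ++ pvVIdx cs i := by
  induction cs with
  | nil => intro i cnt vidx fc; simp [pvPhase1, pvVIdx]
  | cons c rest ih =>
    intro i cnt vidx fc
    cases hc : pvVowels.contains c with
    | true => simp only [pvPhase1, pvVIdx, hc, if_pos, ih, List.append_assoc, List.singleton_append]
    | false => simp only [pvPhase1, pvVIdx, hc, Bool.false_eq_true, if_false, ih]

lemma pvPhase1_fc (cs : List Char) :
    ∀ (i : Nat) (cnt : Int) (vidx fc : List Int) (k : Nat),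
      (pvPhase1 cs i cnt vidx fc).2[k]? =
        if i < k ∧ k ≤ i + cs.length ∧ k < fc.length
        then some (cnt + ((cs.take (k - i)).countP (fun c => !pvVowels.contains c) : Int))
        else fc[k]? := by
  induction cs with
  | nil =>
    intro i cnt vidx fc k
    simp only [pvPhase1, List.length_nil]
    rw [if_neg (by omega)]
  | cons c rest ih =>
    intro i cnt vidx fc k
    have key : ∀ (cnt' : Int) (vidx' : List Int), cnt' = cnt + (if pvVowels.contains c then 0 else 1) →
        (pvPhase1 rest (i+1) cnt' vidx' (fc.set (i+1) cnt')).2[k]? =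
        if i < k ∧ k ≤ i + (c :: rest).length ∧ k < fc.length
        then some (cnt + (((c :: rest).take (k - i)).countP (fun c => !pvVowels.contains c) : Int))
        else fc[k]? := by
      intro cnt' vidx' hcnt'
      rw [ih]
      simp only [List.length_set, List.length_cons]
      by_cases h1 : i + 1 < k ∧ k ≤ i + 1 + rest.length ∧ k < fc.length
      · rw [if_pos h1, if_pos (by omega)]
        have htake : (c :: rest).take (k - i) = c :: rest.take (k - i - 1) := by
          obtain ⟨m, hm⟩ : ∃ m, k - i = m + 1 := ⟨k - i - 1, by omega⟩
          have hm' : k - i - 1 = m := by omega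
          rw [hm', hm, List.take_succ_cons]
        rw [htake, List.countP_cons, show k - (i+1) = k - i - 1 from by omega]
        subst hcnt'
        cases hc : pvVowels.contains c <;> simp [hc] <;> push_cast <;> ring
      · rw [if_neg h1, pv_getElem?_set]
        by_cases h2 : i + 1 = k ∧ i + 1 < fc.length
        · rw [if_pos h2, if_pos (by omega)]
          have htake : (c :: rest).take (k - i) = [c] := by
            rw [show k - i = 1 from by omega]
            simp
          rw [htake, List.countP_cons]
          subst hcnt'
          cases hc : pvVowels.contains c <;> simp [hc]
        · rw [if_neg h2, if_neg (by omega)]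
    cases hc : pvVowels.contains c with
    | true =>
      simp only [pvPhase1, hc, if_pos]
      exact key cnt _ (by rw [if_pos hc]; ring)
    | false =>
      simp only [pvPhase1, hc, Bool.false_eq_true, if_false]
      exact key (cnt + 1) _ (by rw [if_neg (by rw [hc]; simp)])

lemma pvVIdx_mem (cs : List Char) :
    ∀ (i : Nat), ∀ x ∈ pvVIdx cs i, ∃ v : Nat, x = (v : Int) ∧ i ≤ v ∧ v - i < cs.length ∧
      pvVowels.contains (cs.getD (v - i) 'x') = true := by
  induction cs with
  | nil => intro i x hx; simp [pvVIdx] at hx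
  | cons c rest ih =>
    intro i x hx
    cases hc : pvVowels.contains c with
    | true =>
      simp only [pvVIdx, hc, if_pos] at hx
      rcases List.mem_cons.mp hx with rfl | hx
      · exact ⟨i, rfl, le_refl _, by simp, by simpa using hc⟩
      · obtain ⟨v, rfl, h1, h2, h3⟩ := ih (i+1) x hx
        refine ⟨v, rfl, by omega, by simp; omega, ?_⟩
        have : v - i = (v - (i+1)) + 1 := by omega
        rw [this]; simpa using h3
    | false =>
      simp only [pvVIdx, hc, Bool.false_eq_true, if_false] at hx
      obtain ⟨v, rfl, h1, h2, h3⟩ := ih (i+1) x hx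
      refine ⟨v, rfl, by omega, by simp; omega, ?_⟩
      have : v - i = (v - (i+1)) + 1 := by omega
      rw [this]; simpa using h3

lemma pvVIdx_pairwise (cs : List Char) : ∀ (i : Nat), (pvVIdx cs i).Pairwise (· < ·) := by
  induction cs with
  | nil => intro i; simp [pvVIdx]
  | cons c rest ih =>
    intro i
    cases hc : pvVowels.contains c with
    | true =>
      simp only [pvVIdx, hc, if_pos]
      refine List.Pairwise.cons ?_ (ih (i+1))
      intro x hx
      obtain ⟨v, rfl, h1, _, _⟩ := pvVIdx_mem rest (i+1) x hx
      exact_mod_cast by omega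
    | false =>
      simpa only [pvVIdx, hc, Bool.false_eq_true, if_false] using ih (i+1)

lemma pvF_mono (cs : List Char) {a b : Nat} (h : a ≤ b) : pvF cs a ≤ pvF cs b := by
  unfold pvF
  have : cs.take a = (cs.take b).take a := by rw [List.take_take, Nat.min_eq_left h]
  rw [this]
  exact_mod_cast (List.take_sublist _ _).countP_le (p := fun c => !pvVowels.contains c)

lemma pvF_vowel (cs : List Char) (v : Nat) (hv : v < cs.length)
    (h : pvVowels.contains (cs.getD v 'x') = true) : pvF cs (v+1) = pvF cs v := by
  unfold pvF
  norm_cast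
  rw [List.take_add_one, List.getElem?_eq_getElem hv]
  rw [List.getD_eq_getElem cs 'x' hv] at h
  have h' : cs[v] ∈ pvVowels := by simpa using h
  rw [List.countP_append]
  simp [h']

lemma pv_fc_val (cs : List Char) (k : Nat) (hk : k ≤ cs.length) :
    PySem.List.pyGetD (pvPhase1 cs 0 0 [] (List.replicate (cs.length+1) 0)).2 (k : Int) 0 = pvF cs k := by
  rw [PySem.List.pyGetD_natCast, List.getD_eq_getElem?_getD, pvPhase1_fc]
  rcases Nat.eq_zero_or_pos k with rfl | hk0
  · rw [if_neg (by omega)]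
    simp [pvF]
  · rw [if_pos (by simp; omega)]
    simp [pvF]

lemma pv_vidx_elt (cs : List Char) (j : Nat)
    (hj : j < (pvPhase1 cs 0 0 [] (List.replicate (cs.length+1) 0)).1.length) :
    ∃ v : Nat, (pvPhase1 cs 0 0 [] (List.replicate (cs.length+1) 0)).1.getD j 0 = (v : Int)
      ∧ v < cs.length ∧ pvVowels.contains (cs.getD v 'x') = true := by
  have hPeq : (pvPhase1 cs 0 0 [] (List.replicate (cs.length+1) 0)).1 = pvVIdx cs 0 := by
    rw [pvPhase1_fst, List.nil_append]
  rw [hPeq] at hj ⊢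
  have hmem : (pvVIdx cs 0).getD j 0 ∈ pvVIdx cs 0 := by
    rw [List.getD_eq_getElem _ 0 hj]
    exact List.getElem_mem hj
  obtain ⟨v, hv1, _, hv2, hv3⟩ := pvVIdx_mem cs 0 _ hmem
  exact ⟨v, hv1, by simpa using hv2, by simpa using hv3⟩

lemma pvHv (cs : List Char) :
    ∀ j, j < (pvPhase1 cs 0 0 [] (List.replicate (cs.length+1) 0)).1.length →
      PySem.List.pyGetD (pvPhase1 cs 0 0 [] (List.replicate (cs.length+1) 0)).2
        ((pvPhase1 cs 0 0 [] (List.replicate (cs.length+1) 0)).1.getD j 0 + 1) 0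
      = pvG (pvPhase1 cs 0 0 [] (List.replicate (cs.length+1) 0)).2
            (pvPhase1 cs 0 0 [] (List.replicate (cs.length+1) 0)).1 j := by
  intro j hj
  obtain ⟨v, hv1, hv2, hv3⟩ := pv_vidx_elt cs j hj
  unfold pvG
  rw [hv1, show ((v : Int) + 1) = ((v + 1 : Nat) : Int) by push_cast; ring]
  rw [pv_fc_val cs (v+1) (by omega), pv_fc_val cs v (by omega)]
  exact pvF_vowel cs v hv2 hv3

lemma pvHm (cs : List Char) :
    ∀ i j, i ≤ j → j < (pvPhase1 cs 0 0 [] (List.replicate (cs.length+1) 0)).1.length →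
      pvG (pvPhase1 cs 0 0 [] (List.replicate (cs.length+1) 0)).2
          (pvPhase1 cs 0 0 [] (List.replicate (cs.length+1) 0)).1 i
      ≤ pvG (pvPhase1 cs 0 0 [] (List.replicate (cs.length+1) 0)).2
            (pvPhase1 cs 0 0 [] (List.replicate (cs.length+1) 0)).1 j := by
  intro i j hij hj
  rcases Nat.eq_or_lt_of_le hij with rfl | hlt
  · exact le_refl _
  obtain ⟨vi, hvi1, hvi2, _⟩ := pv_vidx_elt cs i (by omega)
  obtain ⟨vj, hvj1, hvj2, _⟩ := pv_vidx_elt cs j hj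
  have hpair : (pvPhase1 cs 0 0 [] (List.replicate (cs.length+1) 0)).1.Pairwise (· < ·) := by
    rw [pvPhase1_fst, List.nil_append]
    exact pvVIdx_pairwise cs 0
  have hlt' : (pvPhase1 cs 0 0 [] (List.replicate (cs.length+1) 0)).1.getD i 0
      < (pvPhase1 cs 0 0 [] (List.replicate (cs.length+1) 0)).1.getD j 0 := by
    rw [List.getD_eq_getElem _ 0 (by omega : i < _), List.getD_eq_getElem _ 0 hj]
    exact List.pairwise_iff_getElem.mp hpair i j (by omega) hj hlt
  rw [hvi1, hvj1] at hlt'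
  have hvle : vi ≤ vj := by exact_mod_cast Int.le_of_lt hlt'
  unfold pvG
  rw [hvi1, hvj1, pv_fc_val cs vi (by omega), pv_fc_val cs vj (by omega)]
  exact pvF_mono cs hvle

-- ===== VERDICT (by name: the statement is the Claim_ definition above) =====
theorem solve_spec : Claim_equal_solve := by
  intro flaw s _
  unfold Spec_solve solve solve_alt
  have h := pvInv flaw (pvPhase1 s.toList 0 0 [] (List.replicate (s.toList.length+1) 0)).2
      (pvPhase1 s.toList 0 0 [] (List.replicate (s.toList.length+1) 0)).1
      (pvHv s.toList) (pvHm s.toList)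
      (pvPhase1 s.toList 0 0 [] (List.replicate (s.toList.length+1) 0)).1.length (le_refl _)
  simpa [pvStepA, pvStepB] using h.1
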